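-- pv_equiv track=rewrite | github.com/xdaniel52/DailyCodingProblems-AuthorialSolutions | 1-100/DailyCodingProblem31.py | EditDictance
-- ===== SOURCE A (Python) =====
-- def EditDictance(s1,s2):
--     s1_len = len(s1)
--     s2_len = len(s2)
--     if s1_len == s2_len:
--         return Helpper(s1, s2)
--     elif s1_len < s2_len:
--         min_counter = s2_len
--         for i in range(s2_len-s1_len+1):
--             count = Helpper(s1, s2[i:i+s1_len])
--             if count < min_counter:
--                 min_counter = count
--
--         return min_counter + (s2_len-s1_len)
--     else:
--         return EditDictance(s2,s1)
--
-- def Helpper(s1,s2):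
--     counter = 0
--     for i in range(len(s1)):
--         if s1[i] != s2[i]:
--             counter+=1
--     return counter
-- ===== SOURCE B (Python) =====
-- def EditDictance(s1, s2):
--     # Index the shorter string's positions per character, then one pass over the
--     # longer string counting, per alignment d, the matching pairs that fall inside
--     # the window [j - gap, j]; answer = gap + m - max(matches).
--     if len(s1) > len(s2):
--         s1, s2 = s2, s1
--     m, n = len(s1), len(s2)
--     gap = n - m
--     positions = {}
--     for i, c in enumerate(s1):
--         positions.setdefault(c, []).append(i)
--     match = [0] * (gap + 1)
--     for j, c in enumerate(s2):
--         lst = positions.get(c, ())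
--         k = _bisect_left(lst, j - gap)
--         while k < len(lst) and lst[k] <= j:
--             match[j - lst[k]] += 1
--             k += 1
--     return gap + m - max(match)
--
-- def _bisect_left(lst, x):
--     lo, hi = 0, len(lst)
--     while lo < hi:
--         mid = (lo + hi) // 2
--         if lst[mid] < x:
--             lo = mid + 1
--         else:
--             hi = mid
--     return lo
-- ===== Notes on version B (the rewrite author's own statement) =====
-- stated objective: alternative
-- what changed: Instead of rescanning every window of the longer string and taking the minimum Hamming distance, B builds a character->positions index of the shorter string once and makes a single pass over the longer string, counting per-alignment MATCHING pairs inside the window located by a binary search, and returns gap + m - max(matches).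
import Mathlib
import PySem

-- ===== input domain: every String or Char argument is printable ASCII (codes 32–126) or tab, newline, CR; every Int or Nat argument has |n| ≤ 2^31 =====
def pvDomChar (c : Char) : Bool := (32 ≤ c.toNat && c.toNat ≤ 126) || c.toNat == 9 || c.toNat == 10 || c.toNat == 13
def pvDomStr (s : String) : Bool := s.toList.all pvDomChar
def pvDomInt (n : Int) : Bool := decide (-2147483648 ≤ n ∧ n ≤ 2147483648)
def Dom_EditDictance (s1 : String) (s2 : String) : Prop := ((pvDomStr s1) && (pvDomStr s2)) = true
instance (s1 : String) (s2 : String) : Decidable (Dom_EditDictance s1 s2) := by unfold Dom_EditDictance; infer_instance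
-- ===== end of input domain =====

-- B replaces A's per-window rescan by a per-character position index of the shorter string and a
-- single pass over the longer string that, via a binary search, visits only in-window equal-character
-- pairs and accumulates match counts per alignment (answer = gap + m - max matches).

-- ===== PORT A =====
-- Helpper(s1, s2): count positions where the characters differ (A only calls it with len s2 = len s1,
-- so both pyGet? are in range and option equality is exact there).
def Helpper (s1 : List Char) (s2 : List Char) : Int :=
  (PySem.List.pyRange 0 (PySem.List.len s1)).foldl
    (fun counter i =>
      if PySem.List.pyGet? s1 i ≠ PySem.List.pyGet? s2 i then counter + 1 else counter)
    0

def EditDictance (s1 : String) (s2 : String) : Int :=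
  let s1_len := PySem.Str.len s1
  let s2_len := PySem.Str.len s2
  if s1_len = s2_len then Helpper s1.toList s2.toList
  else if s1_len < s2_len then
    ((PySem.List.pyRange 0 (s2_len - s1_len + 1)).foldl
      (fun min_counter i =>
        let count := Helpper s1.toList
          (PySem.List.slice s2.toList (some i) (some (i + s1_len)))
        if count < min_counter then count else min_counter)
      s2_len)
    + (s2_len - s1_len)
  else EditDictance s2 s1
termination_by (PySem.Str.len s1 - PySem.Str.len s2).toNat
decreasing_by omega

-- ===== PORT B =====
-- positions = {}; for i, c in enumerate(l1): positions.setdefault(c, []).append(i)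
def posDict (l1 : List Char) : PySem.Dict Char (List Int) :=
  (PySem.List.enumerate l1).foldl (fun d p => d.modify p.2 [] (· ++ [p.1])) PySem.Dict.empty

-- port of _bisect_left: lo, hi = 0, len(lst); while lo < hi: ...
-- (lo, hi, mid are non-negative Python ints, so Nat arithmetic and Nat division are exact;
--  lst[mid] is always in range since lo < hi <= len(lst), so getD is exact)
def pyBisectLoop (lst : List Int) (x : Int) (lo hi : Nat) : Nat :=
  if lo < hi then
    let mid := (lo + hi) / 2
    if lst.getD mid 0 < x then pyBisectLoop lst x (mid + 1) hi
    else pyBisectLoop lst x lo mid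
  else lo
termination_by hi - lo
decreasing_by all_goals omega

def pyBisectLeft (lst : List Int) (x : Int) : Nat := pyBisectLoop lst x 0 lst.length

-- port of the inner while loop: while k < len(lst) and lst[k] <= j: match[j - lst[k]] += 1; k += 1
-- (the loop only reaches indices with j - gap <= lst[k] <= j, so the list update is in range and
--  getD/set are exact for the Python match[...] += 1)
def bumpFrom (j : Int) (lst : List Int) (arr : List Int) (k : Nat) : List Int :=
  if h : k < lst.length then
    if lst[k] ≤ j then
      bumpFrom j lst (arr.set (j - lst[k]).toNat (arr.getD (j - lst[k]).toNat 0 + 1)) (k + 1)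
    else arr
  else arr
termination_by lst.length - k

-- match = [0]*(gap+1); for j, c in enumerate(l2): lst = positions.get(c, ()); k = _bisect_left(lst, j - gap); while ...
def matchArr (l1 : List Char) (l2 : List Char) (gap : Nat) : List Int :=
  (PySem.List.enumerate l2).foldl
    (fun arr p => bumpFrom p.1 ((posDict l1).getD p.2 []) arr
      (pyBisectLeft ((posDict l1).getD p.2 []) (p.1 - (gap : Int))))
    (List.replicate (gap + 1) 0)

-- core on (shorter, longer); max(match) is exact: the list has gap+1 ≥ 1 entries
def EDAltCore (l1 : List Char) (l2 : List Char) : Int :=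
  let m := l1.length
  let n := l2.length
  let gap := n - m
  (gap : Int) + (m : Int) - ((PySem.List.max? (matchArr l1 l2 gap) (fun x => x)).getD 0)

def EditDictance_alt (s1 : String) (s2 : String) : Int :=
  if s2.toList.length < s1.toList.length then EDAltCore s2.toList s1.toList
  else EDAltCore s1.toList s2.toList

-- ===== PRECONDITION & SPEC =====
def Spec_EditDictance (s1 : String) (s2 : String) (out : Int) : Prop := out = EditDictance_alt s1 s2
instance (s1 : String) (s2 : String) (out : Int) : Decidable (Spec_EditDictance s1 s2 out) := by unfold Spec_EditDictance; infer_instance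

-- ===== CLAIM (what is proved, stated in full; the proofs are below) =====
def Claim_equal_EditDictance : Prop := ∀ (s1 : String) (s2 : String), Dom_EditDictance s1 s2 → Spec_EditDictance s1 s2 (EditDictance s1 s2)

-- ===== LEMMAS AND PROOFS =====

lemma countP_not_aux {α : Type} (p : α → Bool) (l : List α) :
    l.countP p + l.countP (fun x => !p x) = l.length := by
  induction l with
  | nil => simp
  | cons x t ih => by_cases h : p x <;> simp [h] <;> omega

lemma helpper_eq (a w : List Char) :
    Helpper a w = (a.length : Int) -
      (List.range a.length).countP (fun i => a[i]? == w[i]?) := by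
  unfold Helpper
  rw [show PySem.List.len a = ((a.length : Nat) : Int) from by simp [PySem.List.len],
      PySem.List.pyRange_one, List.foldl_map]
  rw [show (fun (counter : Int) (k : Nat) =>
        if PySem.List.pyGet? a (0 + (k:Int)) ≠ PySem.List.pyGet? w (0 + (k:Int)) then counter + 1 else counter)
      = (fun counter k => if (fun k => !(a[k]? == w[k]?)) k = true then counter + 1 else counter) from by
    funext c k
    simp [PySem.List.pyGet?_natCast]]
  rw [PySem.List.foldl_count_if]
  have h1 := countP_not_aux (fun i => a[i]? == w[i]?) (List.range a.length)
  have h2 : (List.range a.length).countP (fun i => a[i]? == w[i]?) ≤ a.length := by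
    have := List.countP_le_length (p := fun i => a[i]? == w[i]?) (l := List.range a.length)
    simpa using this
  simp only [List.length_range] at h1
  simp only [Int.sub_zero, Int.toNat_natCast]
  omega

def cnt (a b : List Char) (d : Nat) : Nat :=
  (List.range a.length).countP (fun i => a[i]? == b[d + i]?)

lemma helpper_slice (a b : List Char) (d : Nat) :
    Helpper a (PySem.List.slice b (some (d : Int)) (some ((d : Int) + (a.length : Int))))
      = (a.length : Int) - cnt a b d := by
  rw [show ((d:Int) + (a.length:Int)) = (((d + a.length : Nat) : Nat) : Int) from by push_cast; ring]
  rw [PySem.List.slice_natCast, helpper_eq]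
  unfold cnt
  congr 1
  norm_cast
  apply List.countP_congr
  intro i hi
  simp only [List.mem_range] at hi
  rw [List.getElem?_take, List.getElem?_drop]
  simp [hi]

lemma posDict_getD (l1 : List Char) (c : Char) :
    (posDict l1).getD c []
      = ((PySem.List.enumerate l1).filter (fun p => p.2 == c)).map (·.1) := by
  unfold posDict
  rw [show (PySem.List.enumerate l1).foldl (fun d p => d.modify p.2 [] (· ++ [p.1])) PySem.Dict.empty
      = ((PySem.List.enumerate l1).map (fun p => (p.2, p.1))).foldl
          (fun d p => d.modify p.1 [] (· ++ [p.2])) PySem.Dict.empty from by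
    rw [List.foldl_map]]
  rw [PySem.Dict.getD_foldl_modify_append]
  rw [List.filter_map, List.map_map]
  rfl

lemma posDict_count (l1 : List Char) (c : Char) (w : Int) :
    ((posDict l1).getD c []).count w
      = if 0 ≤ w ∧ l1[w.toNat]? = some c then 1 else 0 := by
  have hnd : ((posDict l1).getD c []).Nodup := by
    rw [posDict_getD]
    have hp : ((PySem.List.enumerate l1).filter (fun p => p.2 == c)).Pairwise (fun p q => p.1 < q.1) :=
      List.Pairwise.filter _ (PySem.List.pairwise_lt_enumerate l1 0)
    have : (((PySem.List.enumerate l1).filter (fun p => p.2 == c)).map (·.1)).Pairwise (· < ·) := by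
      rw [List.pairwise_map]; exact hp
    exact List.Pairwise.imp (fun h => ne_of_lt h) this
  have hmem : w ∈ (posDict l1).getD c [] ↔ (0 ≤ w ∧ l1[w.toNat]? = some c) := by
    rw [posDict_getD]
    simp only [List.mem_map, List.mem_filter, PySem.List.mem_enumerate_iff]
    constructor
    · rintro ⟨p, ⟨⟨k, hk, rfl⟩, hc⟩, rfl⟩
      simp only [beq_iff_eq] at hc
      refine ⟨by simp, ?_⟩
      simp only [zero_add, Int.toNat_natCast]
      rw [List.getElem?_eq_getElem hk, hc]
    · rintro ⟨h0, hsome⟩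
      have hk : w.toNat < l1.length := by
        by_contra hge
        rw [List.getElem?_eq_none_iff.mpr (by omega)] at hsome
        simp at hsome
      refine ⟨((w.toNat : Int), l1[w.toNat]), ⟨⟨w.toNat, hk, by simp⟩, ?_⟩, by omega⟩
      simp only [beq_iff_eq]
      have := List.getElem?_eq_getElem hk
      rw [this] at hsome
      exact Option.some.inj hsome
  rw [List.Nodup.count hnd]
  simp [hmem]

def bumpGo (j : Int) (arr : List Int) : List Int → List Int
  | [] => arr
  | i :: t => if i ≤ j then bumpGo j (arr.set (j - i).toNat (arr.getD (j - i).toNat 0 + 1)) t else arr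

lemma bumpFrom_eq (j : Int) (lst : List Int) (arr : List Int) (k : Nat) :
    bumpFrom j lst arr k = bumpGo j arr (lst.drop k) := by
  induction hn : lst.length - k using Nat.strong_induction_on generalizing arr k with
  | _ n ih =>
    rw [bumpFrom]
    by_cases h : k < lst.length
    · rw [dif_pos h, List.drop_eq_getElem_cons h]
      by_cases hj : lst[k] ≤ j
      · rw [if_pos hj]
        unfold bumpGo
        rw [if_pos hj]
        exact ih (lst.length - (k+1)) (by omega) _ _ rfl
      · rw [if_neg hj]
        unfold bumpGo
        rw [if_neg hj]
    · rw [dif_neg h, List.drop_eq_nil_of_le (by omega)]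
      rfl

lemma bisect_inv (lst : List Int) (x : Int) (hs : lst.Pairwise (· < ·)) :
    ∀ (lo hi : Nat), lo ≤ hi → hi ≤ lst.length →
    (∀ (i : Nat) (h : i < lst.length), i < lo → lst[i] < x) →
    (∀ (i : Nat) (h : i < lst.length), hi ≤ i → ¬ lst[i] < x) →
    pyBisectLoop lst x lo hi = lst.countP (fun e => decide (e < x)) := by
  intro lo hi
  induction hn : hi - lo using Nat.strong_induction_on generalizing lo hi with
  | _ n ih =>
    intro hlohi hhile hlow hhigh
    rw [pyBisectLoop]
    by_cases h : lo < hi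
    · rw [if_pos h]
      have hmid1 : lo ≤ (lo + hi) / 2 := by omega
      have hmid2 : (lo + hi) / 2 < hi := by omega
      have hmlt : (lo + hi) / 2 < lst.length := by omega
      show (if lst.getD ((lo + hi) / 2) 0 < x then pyBisectLoop lst x ((lo + hi) / 2 + 1) hi
            else pyBisectLoop lst x lo ((lo + hi) / 2)) = _
      rw [List.getD_eq_getElem?_getD, List.getElem?_eq_getElem hmlt]
      simp only [Option.getD_some]
      have hpw := List.pairwise_iff_getElem.mp hs
      by_cases hc : lst[(lo + hi) / 2] < x
      · rw [if_pos hc]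
        refine ih (hi - ((lo + hi) / 2 + 1)) (by omega) ((lo + hi) / 2 + 1) hi rfl (by omega) hhile ?_ hhigh
        intro i hilen hi'
        rcases Nat.lt_or_ge i ((lo + hi) / 2) with hlt | hge
        · exact lt_trans (hpw i ((lo + hi) / 2) hilen hmlt hlt) hc
        · have : i = (lo + hi) / 2 := by omega
          subst this; exact hc
      · rw [if_neg hc]
        refine ih ((lo + hi) / 2 - lo) (by omega) lo ((lo + hi) / 2) rfl (by omega) (by omega) hlow ?_
        intro i hilen hi'
        rcases Nat.lt_or_ge i ((lo + hi) / 2 + 1) with hlt | hge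
        · have : i = (lo + hi) / 2 := by omega
          subst this; exact hc
        · intro habs
          exact hc (lt_trans (hpw ((lo + hi) / 2) i hmlt hilen (by omega)) habs)
    · rw [if_neg h]
      have hlohi' : lo = hi := by omega
      subst hlohi'
      -- countP = lo: first lo elements satisfy, rest do not
      conv_rhs => rw [← List.take_append_drop lo lst, List.countP_append]
      have h1 : (lst.take lo).countP (fun e => decide (e < x)) = lo := by
        have hall : ∀ a ∈ lst.take lo, (fun e => decide (e < x)) a = true := by
          intro a ha
          rw [List.mem_iff_getElem] at ha
          obtain ⟨i, hilt, rfl⟩ := ha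
          have hio : i < lo := by simpa using (lt_of_lt_of_le hilt (by simp))
          rw [List.getElem_take]
          simp only [decide_eq_true_eq]
          exact hlow i (by simp at hilt; omega) (by omega)
        rw [List.countP_eq_length.mpr hall, List.length_take]
        omega
      have h2 : (lst.drop lo).countP (fun e => decide (e < x)) = 0 := by
        apply List.countP_eq_zero.mpr
        intro a ha
        rw [List.mem_iff_getElem] at ha
        obtain ⟨i, hilt, rfl⟩ := ha
        rw [List.getElem_drop]
        simp only [decide_eq_true_eq]
        exact hhigh (lo + i) (by simp at hilt; omega) (by omega)
      omega

lemma drop_rank_sorted (lst : List Int) (x : Int) (hs : lst.Pairwise (· < ·)) :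
    lst.drop (lst.countP (fun e => decide (e < x))) = lst.filter (fun e => decide (x ≤ e)) := by
  induction lst with
  | nil => simp
  | cons i t ih =>
    rw [List.pairwise_cons] at hs
    by_cases hc : i < x
    · rw [List.countP_cons]
      simp only [hc, if_pos, decide_true]
      rw [show t.countP (fun e => decide (e < x)) + 1 = (t.countP (fun e => decide (e < x))).succ from rfl]
      rw [List.drop_succ_cons, List.filter_cons]
      simp only [show decide (x ≤ i) = false from by simp; omega, if_neg Bool.false_ne_true]
      exact ih hs.2
    · have hz : (i :: t).countP (fun e => decide (e < x)) = 0 := by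
        apply List.countP_eq_zero.mpr
        intro a ha
        simp only [decide_eq_true_eq]
        rcases List.mem_cons.mp ha with rfl | hat
        · omega
        · have := hs.1 a hat; omega
      rw [hz, List.drop_zero]
      rw [List.filter_eq_self.mpr ?_]
      intro a ha
      simp only [decide_eq_true_eq]
      rcases List.mem_cons.mp ha with rfl | hat
      · omega
      · have := hs.1 a hat; omega

lemma bumpGo_length (j : Int) (Q arr : List Int) :
    (bumpGo j arr Q).length = arr.length := by
  induction Q generalizing arr with
  | nil => rfl
  | cons i t ih =>
    unfold bumpGo
    split
    · rw [ih]; simp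
    · rfl

lemma bumpGo_getD (j : Int) (gap d : Nat) (Q arr : List Int)
    (hs : Q.Pairwise (· < ·)) (hlow : ∀ e ∈ Q, j - (gap : Int) ≤ e)
    (hlen : arr.length = gap + 1) :
    (bumpGo j arr Q).getD d 0 = arr.getD d 0 + (Q.count (j - (d : Int)) : Int) := by
  induction Q generalizing arr with
  | nil => simp [bumpGo]
  | cons i t ih =>
    rw [List.pairwise_cons] at hs
    unfold bumpGo
    by_cases hij : i ≤ j
    · rw [if_pos hij]
      have hlowi : j - (gap : Int) ≤ i := hlow i (by simp)
      have hlen' : (arr.set (j - i).toNat (arr.getD (j - i).toNat 0 + 1)).length = gap + 1 := by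
        simp [hlen]
      rw [ih _ hs.2 (fun e he => hlow e (List.mem_cons_of_mem i he)) hlen', List.count_cons]
      by_cases heq : i = j - (d : Int)
      · have htn : (j - i).toNat = d := by omega
        have hdlt : d < arr.length := by omega
        rw [htn, List.getD_eq_getElem?_getD, List.getElem?_set_self (by omega), List.getD_eq_getElem?_getD]
        simp [heq, List.getElem?_eq_getElem hdlt]
        ring
      · have hne : (j - i).toNat ≠ d := by omega
        rw [List.getD_eq_getElem?_getD, List.getElem?_set_ne (by omega), ← List.getD_eq_getElem?_getD]
        simp [heq]
    · rw [if_neg hij]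
      have hz : (i :: t).count (j - (d : Int)) = 0 := by
        rw [List.count_eq_zero]
        intro hmem
        rcases List.mem_cons.mp hmem with hh | hat
        · omega
        · have := hs.1 _ hat; omega
      rw [hz]
      simp

lemma posDict_sorted (l1 : List Char) (c : Char) :
    ((posDict l1).getD c []).Pairwise (· < ·) := by
  rw [posDict_getD]
  have hp : ((PySem.List.enumerate l1).filter (fun p => p.2 == c)).Pairwise (fun p q => p.1 < q.1) :=
    List.Pairwise.filter _ (PySem.List.pairwise_lt_enumerate l1 0)
  rw [List.pairwise_map]
  exact hp

lemma inner_getD (l1 : List Char) (gap : Nat) (j : Int) (c : Char) (arr : List Int) (d : Nat)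
    (hlen : arr.length = gap + 1) (hd : d ≤ gap) :
    (bumpFrom j ((posDict l1).getD c []) arr
        (pyBisectLeft ((posDict l1).getD c []) (j - (gap : Int)))).getD d 0
      = arr.getD d 0 + (((posDict l1).getD c []).count (j - (d : Int)) : Int) := by
  have hs := posDict_sorted l1 c
  unfold pyBisectLeft
  rw [bumpFrom_eq,
      bisect_inv _ _ hs 0 _ (by omega) le_rfl (by omega) (fun i h hi => absurd hi (by omega)),
      drop_rank_sorted _ _ hs,
      bumpGo_getD j gap d _ _ (List.Pairwise.filter _ hs)
        (fun e he => by simpa using (List.mem_filter.mp he).2) hlen,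
      List.count_filter (by simp; omega)]

lemma inner_length (l1 : List Char) (gap : Nat) (j : Int) (c : Char) (arr : List Int) :
    (bumpFrom j ((posDict l1).getD c []) arr
        (pyBisectLeft ((posDict l1).getD c []) (j - (gap : Int)))).length
      = arr.length := by
  unfold pyBisectLeft
  rw [bumpFrom_eq, bumpGo_length]

lemma outer_length (l1 : List Char) (gap : Nat) (es : List (Int × Char)) (arr : List Int) :
    (es.foldl (fun arr p => bumpFrom p.1 ((posDict l1).getD p.2 []) arr
      (pyBisectLeft ((posDict l1).getD p.2 []) (p.1 - (gap : Int)))) arr).length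
      = arr.length := by
  induction es generalizing arr with
  | nil => rfl
  | cons p t ih => rw [List.foldl_cons, ih, inner_length]

lemma outer_getD (l1 : List Char) (gap : Nat) (es : List (Int × Char)) (arr : List Int)
    (d : Nat) (hlen : arr.length = gap + 1) (hd : d ≤ gap) :
    (es.foldl (fun arr p => bumpFrom p.1 ((posDict l1).getD p.2 []) arr
      (pyBisectLeft ((posDict l1).getD p.2 []) (p.1 - (gap : Int)))) arr).getD d 0
      = arr.getD d 0 + (es.map (fun p => ((((posDict l1).getD p.2 []).count (p.1 - (d : Int))) : Int))).sum := by
  induction es generalizing arr with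
  | nil => simp
  | cons p t ih =>
    rw [List.foldl_cons, ih _ (by rw [inner_length]; exact hlen),
        inner_getD _ _ _ _ _ _ hlen hd]
    simp
    ring

lemma matchArr_getD (a b : List Char) (d : Nat) (h : a.length ≤ b.length)
    (hd : d ≤ b.length - a.length) :
    (matchArr a b (b.length - a.length)).getD d 0 = (cnt a b d : Int) := by
  set m := a.length with hm
  set n := b.length with hn
  set gap := n - m with hgap
  unfold matchArr
  rw [outer_getD a gap _ _ d (by simp) hd, List.getD_eq_getElem?_getD]
  simp only [List.getElem?_replicate]
  rw [if_pos (by omega)]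
  simp only [Option.getD_some, zero_add]
  rw [PySem.List.enumerate_eq_map_pyRange b 'a']
  rw [show PySem.List.len b = ((n : Nat) : Int) from by simp [PySem.List.len, hn], PySem.List.pyRange_one]
  rw [List.map_map, List.map_map]
  have hfun : (((fun p => ((((posDict a).getD p.2 []).count (p.1 - (d : Int))) : Int)) ∘
      (fun j => (j, PySem.List.pyGetD b j 'a'))) ∘ (fun k : Nat => (0 : Int) + (k : Int)))
      = fun k : Nat => if 0 ≤ (k : Int) - d ∧ a[((k : Int) - d).toNat]? = some (PySem.List.pyGetD b (k : Int) 'a') then (1 : Int) else 0 := by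
    funext k
    simp only [Function.comp, zero_add, posDict_count]
    split <;> simp
  rw [hfun]
  rw [show ((n:Int) - 0).toNat = d + (m + (gap - d)) from by omega]
  rw [List.range_add, List.range_add]
  simp only [List.map_append, List.sum_append, List.map_map]
  have hz1 : (List.map (fun k : Nat => if 0 ≤ (k : Int) - d ∧ a[((k : Int) - d).toNat]? = some (PySem.List.pyGetD b (k : Int) 'a') then (1 : Int) else 0) (List.range d)).sum = 0 := by
    apply List.sum_eq_zero
    intro x hx
    simp only [List.mem_map, List.mem_range] at hx
    obtain ⟨k, hk, rfl⟩ := hx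
    rw [if_neg (by omega)]
  have hz3 : (List.map ((fun k : Nat => if 0 ≤ (k : Int) - d ∧ a[((k : Int) - d).toNat]? = some (PySem.List.pyGetD b (k : Int) 'a') then (1 : Int) else 0) ∘ (fun x => d + x) ∘ fun x => m + x) (List.range (gap - d))).sum = 0 := by
    apply List.sum_eq_zero
    intro x hx
    simp only [List.mem_map, List.mem_range, Function.comp] at hx
    obtain ⟨k, hk, rfl⟩ := hx
    apply if_neg
    rintro ⟨h0, hsome⟩
    rw [show (((d + (m + k) : Nat) : Int) - (d : Int)).toNat = m + k from by push_cast; omega] at hsome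
    rw [List.getElem?_eq_none_iff.mpr (by omega)] at hsome
    simp at hsome
  have hmid : (List.map ((fun k : Nat => if 0 ≤ (k : Int) - d ∧ a[((k : Int) - d).toNat]? = some (PySem.List.pyGetD b (k : Int) 'a') then (1 : Int) else 0) ∘ fun x => d + x) (List.range m)).sum = (cnt a b d : Int) := by
    have hmap : List.map ((fun k : Nat => if 0 ≤ (k : Int) - d ∧ a[((k : Int) - d).toNat]? = some (PySem.List.pyGetD b (k : Int) 'a') then (1 : Int) else 0) ∘ fun x => d + x) (List.range m)
        = List.map (fun i : Nat => if (fun i : Nat => a[i]? == b[d + i]?) i = true then (1 : Int) else 0) (List.range m) := by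
      apply List.map_congr_left
      intro i hi
      simp only [List.mem_range] at hi
      simp only [Function.comp]
      have hdn : d + i < n := by omega
      have hget : PySem.List.pyGetD b ((d + i : Nat) : Int) 'a' = b[d + i] := by
        rw [PySem.List.pyGetD_natCast]
        simp [List.getElem?_eq_getElem hdn]
      rw [show (((d + i : Nat) : Int) - (d : Int)).toNat = i from by push_cast; omega, hget]
      have : (0 : Int) ≤ ((d + i : Nat) : Int) - d := by push_cast; omega
      simp only [this, true_and]
      have hb : b[d + i]? = some b[d + i] := List.getElem?_eq_getElem hdn
      by_cases hc : a[i]? = some b[d + i] <;> simp [hb, hc]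
    rw [hmap, PySem.List.sum_map_ite_one_zero]
    rfl
  rw [hz1, hz3, hmid]
  ring

lemma matchArr_length (a b : List Char) (gap : Nat) :
    (matchArr a b gap).length = gap + 1 := by
  unfold matchArr
  rw [outer_length]
  simp

lemma matchArr_eq (a b : List Char) (h : a.length ≤ b.length) :
    matchArr a b (b.length - a.length)
      = (List.range (b.length - a.length + 1)).map (fun d => (cnt a b d : Int)) := by
  apply List.ext_getElem
  · rw [matchArr_length]; simp
  · intro i h1 h2
    have hi : i ≤ b.length - a.length := by
      rw [matchArr_length] at h1; omega
    have := matchArr_getD a b i h hi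
    rw [List.getD_eq_getElem?_getD, List.getElem?_eq_getElem h1] at this
    simp only [Option.getD_some] at this
    rw [this]
    simp

lemma foldl_minupd (C : Int) (L : List Int) (acc : Int) :
    L.foldl (fun mc v => if C - v < mc then C - v else mc) acc
      = C - L.foldl (fun x v => max x v) (C - acc) := by
  induction L generalizing acc with
  | nil => simp
  | cons v t ih =>
    rw [List.foldl_cons, List.foldl_cons, ih]
    have : C - (if C - v < acc then C - v else acc) = max (C - acc) v := by
      simp only [max_def]
      split <;> split <;> omega
    rw [this]

lemma foldl_max_drop_init (L : List Int) (x acc : Int) (hax : acc ≤ x) :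
    (x :: L).foldl (fun a v => max a v) acc = L.foldl (fun a v => max a v) x := by
  rw [List.foldl_cons, max_eq_right hax]

lemma core_eq (a b : List Char) (h : a.length < b.length) :
    ((PySem.List.pyRange 0 ((b.length : Int) - (a.length : Int) + 1)).foldl
      (fun min_counter i =>
        let count := Helpper a (PySem.List.slice b (some i) (some (i + (a.length : Int))))
        if count < min_counter then count else min_counter)
      (b.length : Int))
    + ((b.length : Int) - (a.length : Int)) = EDAltCore a b := by
  set m := a.length with hm
  set n := b.length with hn
  set gap := n - m with hgap
  rw [PySem.List.pyRange_one, List.foldl_map]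
  rw [show (((n : Int) - (m : Int) + 1) - 0).toNat = gap + 1 from by omega]
  have hbody : (fun (min_counter : Int) (k : Nat) =>
      let count := Helpper a (PySem.List.slice b (some ((0 : Int) + (k : Int))) (some ((0 : Int) + (k : Int) + (m : Int))))
      if count < min_counter then count else min_counter)
      = fun mc k => (fun (mc : Int) (v : Int) => if (m : Int) - v < mc then (m : Int) - v else mc) mc ((fun d : Nat => (cnt a b d : Int)) k) := by
    funext mc k
    simp only [zero_add]
    rw [helpper_slice a b k]
  rw [hbody, ← List.foldl_map (f := fun d : Nat => (cnt a b d : Int))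
        (g := fun (mc : Int) (v : Int) => if (m : Int) - v < mc then (m : Int) - v else mc)
        (l := List.range (gap + 1)) (init := ((n : Nat) : Int)), foldl_minupd]
  unfold EDAltCore
  simp only
  rw [hgap, hn, hm]
  rw [matchArr_eq a b (le_of_lt h)]
  rw [List.range_succ_eq_map, List.map_cons]
  rw [PySem.List.max?_id_cons]
  rw [foldl_max_drop_init _ _ _ (by omega)]
  simp only [Option.getD_some, List.map_map]
  have hmn : a.length ≤ b.length := le_of_lt h
  have heta : (fun (x v : Int) => max x v) = (max : Int → Int → Int) := rfl
  rw [heta]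
  push_cast [hmn]
  omega

lemma core_eq_same (a b : List Char) (h : a.length = b.length) :
    Helpper a b = EDAltCore a b := by
  rw [helpper_eq]
  unfold EDAltCore
  simp only
  rw [show b.length - a.length = 0 from by omega]
  have hme := matchArr_eq a b (le_of_eq h)
  rw [show b.length - a.length = 0 from by omega] at hme
  rw [show (List.range (0+1)) = [0] from rfl, List.map_cons, List.map_nil] at hme
  rw [hme, PySem.List.max?_id_cons]
  simp only [List.foldl_nil, Option.getD_some]
  have : cnt a b 0 = List.countP (fun i => a[i]? == b[i]?) (List.range a.length) := by
    unfold cnt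
    apply List.countP_congr
    intro i hi
    simp
  rw [this]
  push_cast
  ring

lemma edit_le (s1 s2 : String) (h : s1.toList.length ≤ s2.toList.length) :
    EditDictance s1 s2 = EDAltCore s1.toList s2.toList := by
  rw [EditDictance]
  simp only [PySem.Str.len_eq]
  by_cases heq : s1.toList.length = s2.toList.length
  · rw [if_pos (by exact_mod_cast heq)]
    exact core_eq_same _ _ heq
  · have hlt : s1.toList.length < s2.toList.length := by omega
    rw [if_neg (by exact_mod_cast heq), if_pos (by exact_mod_cast hlt)]
    exact core_eq _ _ hlt

lemma edit_eq (s1 s2 : String) : EditDictance s1 s2 = EditDictance_alt s1 s2 := by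
  unfold EditDictance_alt
  by_cases h : s2.toList.length < s1.toList.length
  · rw [if_pos h]
    rw [EditDictance]
    simp only [PySem.Str.len_eq]
    rw [if_neg (by intro hc; exact absurd (by exact_mod_cast hc : s1.toList.length = s2.toList.length) (by omega)),
        if_neg (by intro hc; exact absurd (by exact_mod_cast hc : (s1.toList.length : Int) < s2.toList.length) (by omega))]
    exact edit_le s2 s1 (le_of_lt h)
  · rw [if_neg h]
    exact edit_le s1 s2 (by omega)

-- ===== VERDICT (by name: the statement is the Claim_ definition above) =====
theorem EditDictance_spec : Claim_equal_EditDictance := by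
  intro s1 s2 _
  unfold Spec_EditDictance
  exact edit_eq s1 s2
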